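-- pv_equiv track=rewrite | github.com/falvarezb/coding-challenges | python/grid/grid_solution.py | paths_forbidden_cells
-- ===== SOURCE A (Python) =====
-- def paths_forbidden_cells(m: int, n: int, forbidden_cells: list):
--     """
--     Same as above but now some of the cells are forbidden
--     """
--
--     if (m,n) in forbidden_cells:
--         return [[(0,0)]]
--
--     if m == 1:
--         return [[(1,i) for i in range(1,n+1)]]
--
--     if n == 1:
--         return [[(i,1) for i in range(1,m+1)]]
--
--     return [path + [(m,n)] for path in (paths_forbidden_cells(m, n-1,forbidden_cells) + paths_forbidden_cells(m-1,n,forbidden_cells)) if (0,0) not in path]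
-- ===== SOURCE B (Python) =====
-- def paths_forbidden_cells(m: int, n: int, forbidden_cells: list):
--     """
--     Iterative DP: fill the grid row by row, each cell's path list computed once
--     from the cell to its left and the cell above (same recurrence as the
--     recursive enumeration, evaluated bottom-up instead of top-down).
--     A single-row or single-column grid is answered directly.
--     """
--     fb = set(forbidden_cells)
--     if m == 1 or n == 1:
--         if (m, n) in fb:
--             return [[(0, 0)]]
--         if m == 1:
--             return [[(1, k) for k in range(1, n + 1)]]
--         return [[(k, 1) for k in range(1, m + 1)]]
--     row = []  # path lists for columns 1..n of the previous row
--     for i in range(1, m + 1):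
--         new = []
--         left = None
--         for j in range(1, n + 1):
--             if (i, j) in fb:
--                 cur = [[(0, 0)]]
--             elif i == 1:
--                 cur = [[(1, k) for k in range(1, j + 1)]]
--             elif j == 1:
--                 cur = [[(k, 1) for k in range(1, i + 1)]]
--             else:
--                 cur = [p + [(i, j)] for p in left + row[j - 1] if (0, 0) not in p]
--             new.append(cur)
--             left = cur
--         row = new
--     return row[n - 1]
-- ===== Notes on version B (the rewrite author's own statement) =====
-- stated objective: alternative
-- what changed: Replaces the exponential top-down recursion (which recomputes every sub-grid's path list once per path reaching it) with an iterative bottom-up DP that fills each grid cell's path list exactly once, row by row, answering single-row/column grids directly; intended as faster (a timing run read 2.5-3.3x), but since the output itself grows exponentially both programs hit the clock on large grids, so no unqualified speed claim is made.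
-- outside the precondition, e.g. on paths_forbidden_cells(0, 0, [(0, 0)]): A returns [[(0, 0)]], B raises IndexError; on paths_forbidden_cells(0, 3, [(0, 3)]): A returns [[(0, 0)]], B raises IndexError
import Mathlib
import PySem

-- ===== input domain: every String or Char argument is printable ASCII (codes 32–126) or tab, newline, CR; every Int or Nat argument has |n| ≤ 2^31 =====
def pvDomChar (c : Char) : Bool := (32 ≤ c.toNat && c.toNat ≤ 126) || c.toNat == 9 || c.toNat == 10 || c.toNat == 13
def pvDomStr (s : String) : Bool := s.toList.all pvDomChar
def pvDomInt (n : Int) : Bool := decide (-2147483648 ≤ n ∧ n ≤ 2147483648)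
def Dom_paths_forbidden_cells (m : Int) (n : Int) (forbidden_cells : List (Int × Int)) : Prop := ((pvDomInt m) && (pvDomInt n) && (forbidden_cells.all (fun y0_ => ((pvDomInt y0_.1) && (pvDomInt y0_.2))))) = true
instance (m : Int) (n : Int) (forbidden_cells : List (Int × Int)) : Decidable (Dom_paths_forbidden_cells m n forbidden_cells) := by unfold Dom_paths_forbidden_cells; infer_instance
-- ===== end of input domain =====

-- B replaces A's exponential top-down recursion by an iterative row-by-row DP
-- that computes each cell's path list once (same recurrence, so the same
-- values, including A's [[(0,0)]] sentinel for a forbidden target cell).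

-- ===== PORT A =====
-- A's recursion decreases m+n by 1 each step; the fuel (m+n).toNat + 1 is a
-- totality guard only (sufficient on Pre_: 1 ≤ m ∧ 1 ≤ n; proved below).
def pathsRecA (fuel : Nat) (m n : Int) (fb : List (Int × Int)) : List (List (Int × Int)) :=
  match fuel with
  | 0 => []
  | fuel + 1 =>
    if (m, n) ∈ fb then [[((0 : Int), (0 : Int))]]
    else if m = 1 then [(PySem.List.pyRange 1 (n+1) 1).map (fun i => ((1 : Int), i))]
    else if n = 1 then [(PySem.List.pyRange 1 (m+1) 1).map (fun i => (i, (1 : Int)))]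
    else ((pathsRecA fuel m (n-1) fb ++ pathsRecA fuel (m-1) n fb).filter
            (fun p => !decide (((0 : Int), (0 : Int)) ∈ p))).map (fun p => p ++ [(m, n)])

def paths_forbidden_cells (m : Int) (n : Int) (forbidden_cells : List (Int × Int)) : List (List (Int × Int)) :=
  pathsRecA ((m + n).toNat + 1) m n forbidden_cells

-- ===== PORT B =====
def paths_forbidden_cells_alt (m : Int) (n : Int) (forbidden_cells : List (Int × Int)) : List (List (Int × Int)) :=
  let fbs : PySem.Set (Int × Int) := PySem.Set.ofList forbidden_cells
  if m = 1 ∨ n = 1 then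
    if fbs.contains (m, n) then [[((0 : Int), (0 : Int))]]
    else if m = 1 then [(PySem.List.pyRange 1 (n+1) 1).map (fun k => ((1 : Int), k))]
    else [(PySem.List.pyRange 1 (m+1) 1).map (fun k => (k, (1 : Int)))]
  else
  let row := (PySem.List.pyRange 1 (m+1) 1).foldl (fun row i =>
    ((PySem.List.pyRange 1 (n+1) 1).foldl
      (fun (st : List (List (List (Int × Int))) × Option (List (List (Int × Int)))) j =>
        let cur :=
          if fbs.contains (i, j) then [[((0 : Int), (0 : Int))]]
          else if i = 1 then [(PySem.List.pyRange 1 (j+1) 1).map (fun k => ((1 : Int), k))]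
          else if j = 1 then [(PySem.List.pyRange 1 (i+1) 1).map (fun k => (k, (1 : Int)))]
          else ((st.2.getD [] ++ (PySem.List.pyGet? row (j-1)).getD []).filter
                  (fun p => !decide (((0 : Int), (0 : Int)) ∈ p))).map (fun p => p ++ [(i, j)])
        (st.1 ++ [cur], some cur))
      ([], none)).1) []
  (PySem.List.pyGet? row (n-1)).getD []

-- ===== PRECONDITION & SPEC =====
-- Pre_ excludes grids with a non-positive dimension (other than the kept
-- degenerate single-row/column cases m = 1 or n = 1): there A diverges with
-- RecursionError, except when (m, n) itself is forbidden, where A returns its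
-- [[(0, 0)]] sentinel while B's natural table lookup raises IndexError.
def Pre_paths_forbidden_cells (m : Int) (n : Int) (forbidden_cells : List (Int × Int)) : Prop :=
  (1 ≤ m ∧ 1 ≤ n) ∨ m = 1 ∨ n = 1
instance (m : Int) (n : Int) (forbidden_cells : List (Int × Int)) : Decidable (Pre_paths_forbidden_cells m n forbidden_cells) := by unfold Pre_paths_forbidden_cells; infer_instance

def pvWitness_paths_forbidden_cells : Int × Int × (List (Int × Int)) := (2, 2, [(1, 2)])

def Spec_paths_forbidden_cells (m : Int) (n : Int) (forbidden_cells : List (Int × Int)) (out : List (List (Int × Int))) : Prop := out = paths_forbidden_cells_alt m n forbidden_cells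
instance (m : Int) (n : Int) (forbidden_cells : List (Int × Int)) (out : List (List (Int × Int))) : Decidable (Spec_paths_forbidden_cells m n forbidden_cells out) := by unfold Spec_paths_forbidden_cells; infer_instance

-- ===== CLAIM (what is proved, stated in full; the proofs are below) =====
def Claim_equal_paths_forbidden_cells : Prop := ∀ (m : Int) (n : Int) (forbidden_cells : List (Int × Int)), Dom_paths_forbidden_cells m n forbidden_cells → Pre_paths_forbidden_cells m n forbidden_cells → Spec_paths_forbidden_cells m n forbidden_cells (paths_forbidden_cells m n forbidden_cells)

-- ===== LEMMAS AND PROOFS =====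

-- canonical-fuel value of A's recursion (proof-side abbreviation)
def specP (m n : Int) (fb : List (Int × Int)) : List (List (Int × Int)) :=
  pathsRecA (m + n).toNat m n fb

-- fuel irrelevance: on 1 ≤ m, 1 ≤ n any fuel above the recursion depth gives the same value
lemma pathsRecA_fuel_eq (fb : List (Int × Int)) :
    ∀ (f1 : Nat) (f2 : Nat) (m n : Int), 1 ≤ m → 1 ≤ n →
      (m + n - 2).toNat < f1 → (m + n - 2).toNat < f2 →
      pathsRecA f1 m n fb = pathsRecA f2 m n fb := by
  intro f1
  induction f1 with
  | zero => intro f2 m n _ _ h1 _; omega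
  | succ g1 ih =>
    intro f2 m n hm hn h1 h2
    match f2 with
    | 0 => omega
    | g2 + 1 =>
      simp only [pathsRecA]
      by_cases hfb : (m, n) ∈ fb
      · simp [hfb]
      · simp only [hfb, if_false]
        by_cases hm1 : m = 1
        · simp [hm1]
        · simp only [hm1, if_false]
          by_cases hn1 : n = 1
          · simp [hn1]
          · simp only [hn1, if_false]
            rw [ih g2 m (n-1) hm (by omega) (by omega) (by omega),
                ih g2 (m-1) n (by omega) hn (by omega) (by omega)]

lemma specP_eq_fuel (fb : List (Int × Int)) (f : Nat) (m n : Int)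
    (hm : 1 ≤ m) (hn : 1 ≤ n) (hf : (m + n - 2).toNat < f) :
    pathsRecA f m n fb = specP m n fb := by
  unfold specP
  exact pathsRecA_fuel_eq fb f (m + n).toNat m n hm hn hf (by omega)

lemma specP_forbidden (fb : List (Int × Int)) (m n : Int) (hm : 1 ≤ m) (hn : 1 ≤ n)
    (h : (m, n) ∈ fb) : specP m n fb = [[(0, 0)]] := by
  unfold specP
  have : (m + n).toNat = ((m + n).toNat - 1) + 1 := by omega
  rw [this]
  simp [pathsRecA, h]

lemma specP_row (fb : List (Int × Int)) (n : Int) (hn : 1 ≤ n) (h : ((1 : Int), n) ∉ fb) :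
    specP 1 n fb = [(PySem.List.pyRange 1 (n+1) 1).map (fun i => ((1 : Int), i))] := by
  unfold specP
  have : ((1 : Int) + n).toNat = (((1 : Int) + n).toNat - 1) + 1 := by omega
  rw [this]
  simp [pathsRecA, h]

lemma specP_col (fb : List (Int × Int)) (m : Int) (hm : 2 ≤ m) (h : (m, (1 : Int)) ∉ fb) :
    specP m 1 fb = [(PySem.List.pyRange 1 (m+1) 1).map (fun i => (i, (1 : Int)))] := by
  unfold specP
  have : (m + (1 : Int)).toNat = ((m + (1 : Int)).toNat - 1) + 1 := by omega
  rw [this]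
  have hm1 : m ≠ 1 := by omega
  simp [pathsRecA, h, hm1]

lemma specP_rec (fb : List (Int × Int)) (m n : Int) (hm : 2 ≤ m) (hn : 2 ≤ n)
    (h : (m, n) ∉ fb) :
    specP m n fb = ((specP m (n-1) fb ++ specP (m-1) n fb).filter
        (fun p => !decide (((0 : Int), (0 : Int)) ∈ p))).map (fun p => p ++ [(m, n)]) := by
  conv_lhs => unfold specP
  have : (m + n).toNat = ((m + n).toNat - 1) + 1 := by omega
  rw [this]
  have hm1 : m ≠ 1 := by omega
  have hn1 : n ≠ 1 := by omega
  simp only [pathsRecA, h, if_false, hm1, hn1]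
  rw [specP_eq_fuel fb _ m (n-1) (by omega) (by omega) (by omega),
      specP_eq_fuel fb _ (m-1) n (by omega) (by omega) (by omega)]

-- the inner loop of B builds row i of the DP table
lemma innerB (fb : List (Int × Int)) (n i : Int) (row : List (List (List (Int × Int))))
    (hi : 1 ≤ i)
    (hrow : 2 ≤ i → row = (PySem.List.pyRange 1 (n+1) 1).map (fun j => specP (i-1) j fb)) :
    ∀ (jj : Nat), (jj : Int) ≤ n →
      ((PySem.List.pyRange 1 ((jj : Int) + 1) 1).foldl
        (fun (st : List (List (List (Int × Int))) × Option (List (List (Int × Int)))) j =>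
          let cur :=
            if (PySem.Set.ofList fb).contains (i, j) then [[((0 : Int), (0 : Int))]]
            else if i = 1 then [(PySem.List.pyRange 1 (j+1) 1).map (fun k => ((1 : Int), k))]
            else if j = 1 then [(PySem.List.pyRange 1 (i+1) 1).map (fun k => (k, (1 : Int)))]
            else ((st.2.getD [] ++ (PySem.List.pyGet? row (j-1)).getD []).filter
                    (fun p => !decide (((0 : Int), (0 : Int)) ∈ p))).map (fun p => p ++ [(i, j)])
          (st.1 ++ [cur], some cur))
        ([], none))
      = ((PySem.List.pyRange 1 ((jj : Int) + 1) 1).map (fun j => specP i j fb),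
         if jj = 0 then none else some (specP i (jj : Int) fb)) := by
  intro jj
  induction jj with
  | zero =>
    intro _
    simp [PySem.List.pyRange_one_eq_nil]
  | succ kk ih =>
    intro hjn
    have hk : (kk : Int) ≤ n := by push_cast at hjn ⊢; omega
    have hsplit : PySem.List.pyRange 1 (((kk : Nat) + 1 : Nat) + 1 : Int) 1
        = PySem.List.pyRange 1 ((kk : Int) + 1) 1 ++ [((kk : Int) + 1)] := by
      have := PySem.List.pyRange_one_succ_right (a := 1) (b := (kk : Int) + 1) (by omega)
      push_cast
      push_cast at this
      exact this
    rw [hsplit, List.foldl_append, List.map_append, ih hk]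
    simp only [List.foldl_cons, List.foldl_nil]
    -- reduce the single step
    have hcur :
        (if (PySem.Set.ofList fb).contains (i, (kk : Int) + 1) then [[((0 : Int), (0 : Int))]]
         else if i = 1 then [(PySem.List.pyRange 1 (((kk : Int) + 1)+1) 1).map (fun k => ((1 : Int), k))]
         else if ((kk : Int) + 1) = 1 then [(PySem.List.pyRange 1 (i+1) 1).map (fun k => (k, (1 : Int)))]
         else ((((if kk = 0 then none else some (specP i (kk : Int) fb)) : Option _).getD []
                 ++ (PySem.List.pyGet? row (((kk : Int) + 1)-1)).getD []).filter
                 (fun p => !decide (((0 : Int), (0 : Int)) ∈ p))).map (fun p => p ++ [(i, (kk : Int) + 1)]))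
        = specP i ((kk : Int) + 1) fb := by
      by_cases hfb : (i, (kk : Int) + 1) ∈ fb
      · have hc : (PySem.Set.ofList fb).contains (i, (kk : Int) + 1) = true := by
          rw [PySem.Set.contains_iff]
          exact (PySem.Set.mem_ofList fb _).mpr hfb
        rw [hc, if_pos rfl, specP_forbidden fb i ((kk : Int) + 1) hi (by omega) hfb]
      · have hc : (PySem.Set.ofList fb).contains (i, (kk : Int) + 1) = false := by
          rw [Bool.eq_false_iff]
          intro hcc
          exact hfb ((PySem.Set.mem_ofList fb _).mp ((PySem.Set.contains_iff _ _).mp hcc))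
        rw [hc, if_neg (by simp)]
        by_cases hi1 : i = 1
        · subst hi1
          simp only [if_true]
          rw [specP_row fb ((kk : Int) + 1) (by omega) hfb]
        · simp only [hi1, if_false]
          have hi2 : 2 ≤ i := by omega
          by_cases hk0 : kk = 0
          · subst hk0
            simp only [Nat.cast_zero, zero_add, if_true]
            rw [specP_col fb i hi2 (by simpa using hfb)]
          · have hkk1 : ((kk : Int) + 1) ≠ 1 := by
              have : 1 ≤ (kk : Int) := by exact_mod_cast Nat.one_le_iff_ne_zero.mpr hk0
              omega
            simp only [hkk1, if_false, hk0, if_false, Option.getD_some]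
            have hrow' := hrow hi2
            have hget : (PySem.List.pyGet? row (((kk : Int) + 1) - 1)).getD []
                = specP (i-1) ((kk : Int) + 1) fb := by
              rw [hrow']
              have : ((kk : Int) + 1) - 1 = ((kk : Nat) : Int) := by ring
              rw [this, PySem.List.pyGet?_natCast]
              have hlen : kk < ((PySem.List.pyRange 1 (n+1) 1)).length := by
                rw [PySem.List.length_pyRange_one]; omega
              rw [List.getElem?_map, List.getElem?_eq_getElem hlen]
              simp only [Option.map_some, Option.getD_some]
              rw [PySem.List.getElem_pyRange_one]
              norm_num [add_comm]
            rw [hget,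
                specP_rec fb i ((kk : Int) + 1) hi2
                  (by have : 1 ≤ (kk : Int) := by exact_mod_cast Nat.one_le_iff_ne_zero.mpr hk0
                      omega) hfb]
            norm_num
    rw [hcur]
    simp only [List.map_cons, List.map_nil, Nat.succ_ne_zero, if_false]
    push_cast
    rfl

-- the outer loop of B builds the rows 1..m of the DP table
lemma outerB (fb : List (Int × Int)) (n : Int) (hn : 1 ≤ n) :
    ∀ (mm : Nat), 1 ≤ mm →
      ((PySem.List.pyRange 1 ((mm : Int) + 1) 1).foldl (fun row i =>
        ((PySem.List.pyRange 1 (n+1) 1).foldl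
          (fun (st : List (List (List (Int × Int))) × Option (List (List (Int × Int)))) j =>
            let cur :=
              if (PySem.Set.ofList fb).contains (i, j) then [[((0 : Int), (0 : Int))]]
              else if i = 1 then [(PySem.List.pyRange 1 (j+1) 1).map (fun k => ((1 : Int), k))]
              else if j = 1 then [(PySem.List.pyRange 1 (i+1) 1).map (fun k => (k, (1 : Int)))]
              else ((st.2.getD [] ++ (PySem.List.pyGet? row (j-1)).getD []).filter
                      (fun p => !decide (((0 : Int), (0 : Int)) ∈ p))).map (fun p => p ++ [(i, j)])
            (st.1 ++ [cur], some cur))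
          ([], none)).1) [])
      = (PySem.List.pyRange 1 (n+1) 1).map (fun j => specP (mm : Int) j fb) := by
  intro mm
  induction mm with
  | zero => intro h; omega
  | succ kk ih =>
    intro _
    have hsplit : PySem.List.pyRange 1 ((((kk : Nat) + 1 : Nat) : Int) + 1) 1
        = PySem.List.pyRange 1 ((kk : Int) + 1) 1 ++ [((kk : Int) + 1)] := by
      push_cast
      have := PySem.List.pyRange_one_succ_right (a := 1) (b := (kk : Int) + 1) (by omega)
      push_cast at this
      exact this
    rw [hsplit, List.foldl_append]
    by_cases hk0 : kk = 0
    · subst hk0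
      rw [PySem.List.pyRange_one_eq_nil (a := 1) (b := ((0 : Nat) : Int) + 1) (by omega),
        List.foldl_nil, List.foldl_cons, List.foldl_nil]
      have := innerB fb n (((0 : Nat) : Int) + 1) [] (by omega)
        (fun h => absurd h (by omega)) n.toNat (by omega)
      have hnc : ((n.toNat : Nat) : Int) = n := by omega
      rw [hnc] at this
      rw [this]
      norm_num
    · have hkk : 1 ≤ kk := Nat.one_le_iff_ne_zero.mpr hk0
      rw [ih hkk]
      simp only [List.foldl_cons, List.foldl_nil]
      have := innerB fb n ((kk : Int) + 1)
        ((PySem.List.pyRange 1 (n+1) 1).map (fun j => specP (kk : Int) j fb))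
        (by omega)
        (by intro _; norm_num) n.toNat (by omega)
      have hnc : ((n.toNat : Nat) : Int) = n := by omega
      rw [hnc] at this
      rw [this]
      push_cast
      rfl

-- ===== VERDICT (by name: the statement is the Claim_ definition above) =====
theorem paths_forbidden_cells_spec : Claim_equal_paths_forbidden_cells := by
  intro m n fb _ hpre
  unfold Spec_paths_forbidden_cells paths_forbidden_cells paths_forbidden_cells_alt
  by_cases hmn : m = 1 ∨ n = 1
  · rw [if_pos hmn]
    by_cases hfb : (m, n) ∈ fb
    · have hc : (PySem.Set.ofList fb).contains (m, n) = true :=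
        (PySem.Set.contains_iff _ _).mpr ((PySem.Set.mem_ofList fb _).mpr hfb)
      rw [hc, if_pos rfl]
      simp [pathsRecA, hfb]
    · have hc : (PySem.Set.ofList fb).contains (m, n) = false := by
        rw [Bool.eq_false_iff]
        intro h
        exact hfb ((PySem.Set.mem_ofList fb _).mp ((PySem.Set.contains_iff _ _).mp h))
      rw [hc, if_neg (by simp)]
      by_cases hm1 : m = 1
      · rw [if_pos hm1]
        subst hm1
        simp [pathsRecA, hfb]
      · rw [if_neg hm1]
        have hn1 : n = 1 := hmn.resolve_left hm1
        subst hn1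
        simp [pathsRecA, hfb, hm1]
  · rw [if_neg hmn]
    have hm : 1 ≤ m := by rcases hpre with ⟨h1, _⟩ | h | h; exacts [h1, absurd (Or.inl h) hmn, absurd (Or.inr h) hmn]
    have hn : 1 ≤ n := by rcases hpre with ⟨_, h2⟩ | h | h; exacts [h2, absurd (Or.inl h) hmn, absurd (Or.inr h) hmn]
    rw [specP_eq_fuel fb _ m n hm hn (by omega)]
    have houter := outerB fb n hn m.toNat (by omega)
    have hmc : ((m.toNat : Nat) : Int) = m := by omega
    rw [hmc] at houter
    simp only [houter]
    have hidx : n - 1 = ((n.toNat - 1 : Nat) : Int) := by omega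
    rw [hidx, PySem.List.pyGet?_natCast]
    have hlen : n.toNat - 1 < ((PySem.List.pyRange 1 (n+1) 1)).length := by
      rw [PySem.List.length_pyRange_one]; omega
    rw [List.getElem?_map, List.getElem?_eq_getElem hlen]
    simp only [Option.map_some, Option.getD_some]
    rw [PySem.List.getElem_pyRange_one]
    congr 1
    omega
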